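-- pv_equiv track=rewrite | github.com/spellbook96/mcWFC | BuildMap.py | find_start_point
-- ===== SOURCE A (Python) =====
-- def find_start_point(result):
--     a = 1
--     b = 1
--
--     check_filter= result
--     for i in range(len(check_filter)):
--         for j in range(len(check_filter[i])):
--             if i>0 and j >0:
--                 if check_filter[i][j]+check_filter[i][j-1]+check_filter[i-1][j]+check_filter[i-1][j-1]>check_filter[a][b]+check_filter[a][b-1]+check_filter[a-1][b]+check_filter[a-1][b-1]:
--                     a = i
--                     b = j
--     a = a*32
--     b = b*32
--     start_point =[a,b]
--     return start_point
-- ===== SOURCE B (Python) =====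
-- def _prefix_sums(row):
--     p = [0]
--     s = 0
--     for v in row:
--         s += v
--         p.append(s)
--     return p
--
--
-- def find_start_point(result):
--     pre = [_prefix_sums(row) for row in result]
--     a = b = 1
--     best = None
--     for i in range(1, len(result)):
--         p, q = pre[i], pre[i - 1]
--         for j in range(1, len(result[i])):
--             s = p[j + 1] - p[j - 1] + q[j + 1] - q[j - 1]
--             if best is None or s > best:
--                 a, b, best = i, j, s
--     return [a * 32, b * 32]
-- ===== Notes on version B (the rewrite author's own statement) =====
-- stated objective: alternative
-- what changed: B builds per-row prefix-sum tables once and scans only the valid positions (i>=1, j>=1), computing each 2x2 block sum in O(1) as two prefix differences while carrying the current best sum (initially None) in the loop state, instead of A's full scan that re-sums all four cells and re-derives the incumbent's sum by four fresh list indexings on every comparison; Pre_ excludes exactly the ragged/short inputs on which A raises IndexError.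
import Mathlib
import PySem

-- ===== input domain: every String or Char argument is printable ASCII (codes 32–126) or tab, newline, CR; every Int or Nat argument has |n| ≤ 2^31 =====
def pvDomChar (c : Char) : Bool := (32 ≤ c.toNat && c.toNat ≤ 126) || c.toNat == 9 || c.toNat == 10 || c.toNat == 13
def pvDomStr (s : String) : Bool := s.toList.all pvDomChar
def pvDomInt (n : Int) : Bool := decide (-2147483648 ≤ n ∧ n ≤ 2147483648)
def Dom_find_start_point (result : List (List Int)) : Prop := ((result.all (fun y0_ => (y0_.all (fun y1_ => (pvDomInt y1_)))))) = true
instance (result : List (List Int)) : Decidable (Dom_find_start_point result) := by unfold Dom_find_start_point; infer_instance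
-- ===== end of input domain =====

-- B replaces A's eight list indexings per comparison by per-row prefix sums (each 2x2 block
-- sum is two prefix differences) and carries the running best sum in the loop state.

-- ===== PORT A =====
-- check_filter[i][j] with defaults; in range on every access A actually performs inside Pre_
def pvCell (cf : List (List Int)) (i j : Int) : Int :=
  PySem.List.pyGetD (PySem.List.pyGetD cf i []) j 0

-- the 2x2 sum check_filter[i][j]+check_filter[i][j-1]+check_filter[i-1][j]+check_filter[i-1][j-1]
def pvBlockA (cf : List (List Int)) (i j : Int) : Int :=
  pvCell cf i j + pvCell cf i (j - 1) + pvCell cf (i - 1) j + pvCell cf (i - 1) (j - 1)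

def pvStepA (cf : List (List Int)) (i : Int) (st : Int × Int) (j : Int) : Int × Int :=
  if 0 < i ∧ 0 < j then
    if pvBlockA cf i j > pvBlockA cf st.1 st.2 then (i, j) else st
  else st

def pvRowA (cf : List (List Int)) (st : Int × Int) (i : Int) : Int × Int :=
  (PySem.List.pyRange 0 ((PySem.List.pyGetD cf i []).length : Int) 1).foldl (pvStepA cf i) st

def find_start_point (result : List (List Int)) : List Int :=
  let cf := result
  let st := (PySem.List.pyRange 0 (cf.length : Int) 1).foldl (pvRowA cf) (1, 1)
  [st.1 * 32, st.2 * 32]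

-- ===== PORT B =====
-- _prefix_sums: p = [0]; s = 0; for v in row: s += v; p.append(s)
def pvPrefix (row : List Int) : List Int :=
  (row.foldl (fun (ps : List Int × Int) v => (ps.1 ++ [ps.2 + v], ps.2 + v)) ([0], 0)).1

-- 'best is None or s > best'
def pvGtOpt (s : Int) (o : Option Int) : Bool :=
  match o with
  | some bv => decide (bv < s)
  | none => true

def pvStepB (p q : List Int) (i : Int) (st : Int × Int × Option Int) (j : Int) :
    Int × Int × Option Int :=
  let s := PySem.List.pyGetD p (j + 1) 0 - PySem.List.pyGetD p (j - 1) 0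
           + PySem.List.pyGetD q (j + 1) 0 - PySem.List.pyGetD q (j - 1) 0
  if pvGtOpt s st.2.2 then (i, j, some s) else st

def pvRowB (result pre : List (List Int)) (st : Int × Int × Option Int) (i : Int) :
    Int × Int × Option Int :=
  let p := PySem.List.pyGetD pre i []
  let q := PySem.List.pyGetD pre (i - 1) []
  (PySem.List.pyRange 1 ((PySem.List.pyGetD result i []).length : Int) 1).foldl (pvStepB p q i) st

def find_start_point_alt (result : List (List Int)) : List Int :=
  let pre := result.map pvPrefix
  let st := (PySem.List.pyRange 1 (result.length : Int) 1).foldl (pvRowB result pre) (1, 1, none)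
  [st.1 * 32, st.2.1 * 32]

-- ===== PRECONDITION & SPEC =====
-- Pre_ is exactly the set of inputs on which A returns: A raises IndexError iff some row i ≥ 1
-- has ≥ 2 cells (so a comparison fires) while either row 0 or row 1 has < 2 cells (the initial
-- incumbent (1,1) is read) or some row is longer than the row above it (check_filter[i-1][j]).
def Pre_find_start_point (result : List (List Int)) : Prop :=
  (∀ row ∈ result.drop 1, row.length ≤ 1) ∨
  (2 ≤ (result.getD 0 []).length ∧ 2 ≤ (result.getD 1 []).length ∧
    ∀ pr ∈ result.zip (result.drop 1), 2 ≤ pr.2.length → pr.2.length ≤ pr.1.length)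

instance (result : List (List Int)) : Decidable (Pre_find_start_point result) := by
  unfold Pre_find_start_point; infer_instance

def pvWitness_find_start_point : List (List Int) := [[1, 2], [3, 4]]

def Spec_find_start_point (result : List (List Int)) (out : List Int) : Prop :=
  out = find_start_point_alt result
instance (result : List (List Int)) (out : List Int) : Decidable (Spec_find_start_point result out) := by
  unfold Spec_find_start_point; infer_instance

-- ===== CLAIM (what is proved, stated in full; the proofs are below) =====
def Claim_equal_find_start_point : Prop :=
  ∀ (result : List (List Int)), Dom_find_start_point result → Pre_find_start_point result →
    Spec_find_start_point result (find_start_point result)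

-- ===== LEMMAS AND PROOFS =====

-- a fold whose step fixes every state is the identity
theorem pv_foldl_fix {α β : Type} (f : α → β → α) (l : List β)
    (h : ∀ s x, x ∈ l → f s x = s) : ∀ s, l.foldl f s = s := by
  induction l with
  | nil => intro s; rfl
  | cons x t ih =>
      intro s
      rw [List.foldl_cons, h s x (List.mem_cons_self), ih (fun s y hy => h s y (List.mem_cons_of_mem _ hy))]

-- two folds over the same list preserve a relation preserved by each step
theorem pv_foldl_rel {α β γ : Type} (R : α → β → Prop) (f : α → γ → α) (g : β → γ → β) :
    ∀ (l : List γ) (sa : α) (sb : β), R sa sb →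
      (∀ sa sb x, x ∈ l → R sa sb → R (f sa x) (g sb x)) →
      R (l.foldl f sa) (l.foldl g sb) := by
  intro l
  induction l with
  | nil => intro sa sb h _; exact h
  | cons x t ih =>
      intro sa sb h hstep
      exact ih _ _ (hstep sa sb x (List.mem_cons_self) h)
        (fun sa sb y hy => hstep sa sb y (List.mem_cons_of_mem _ hy))

theorem pvPrefix_foldl (row : List Int) : ∀ (l : List Int) (s : Int),
    row.foldl (fun (ps : List Int × Int) v => (ps.1 ++ [ps.2 + v], ps.2 + v)) (l, s)
      = (l ++ (List.range row.length).map (fun k => s + ((row.take (k + 1)).sum)), s + row.sum) := by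
  induction row with
  | nil => intro l s; simp
  | cons v t ih =>
      intro l s
      rw [List.foldl_cons]
      show t.foldl _ (l ++ [s + v], s + v) = _
      rw [ih (l ++ [s + v]) (s + v), List.length_cons, List.range_succ_eq_map]
      simp [List.map_map, Function.comp_def, add_assoc, List.append_assoc]

theorem pvPrefix_eq (row : List Int) :
    pvPrefix row = (List.range (row.length + 1)).map (fun k => (row.take k).sum) := by
  unfold pvPrefix
  rw [pvPrefix_foldl, List.range_succ_eq_map]
  simp [List.map_map, Function.comp_def]

theorem pvPrefix_length (row : List Int) : (pvPrefix row).length = row.length + 1 := by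
  rw [pvPrefix_eq]; simp

-- the prefix difference p[j+1]-p[j-1] is row[j]+row[j-1]
theorem pvPrefix_diff (row : List Int) (j : Int) (h1 : 1 ≤ j) (h2 : j < (row.length : Int)) :
    PySem.List.pyGetD (pvPrefix row) (j + 1) 0 - PySem.List.pyGetD (pvPrefix row) (j - 1) 0
      = PySem.List.pyGetD row j 0 + PySem.List.pyGetD row (j - 1) 0 := by
  obtain ⟨k, rfl⟩ : ∃ k : ℕ, j = (k : ℤ) := ⟨j.toNat, by omega⟩
  have hk1 : 1 ≤ k := by exact_mod_cast h1
  have hk2 : k < row.length := by exact_mod_cast h2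
  have e1 : (k : ℤ) + 1 = ((k + 1 : ℕ) : ℤ) := by push_cast; ring
  have e2 : (k : ℤ) - 1 = ((k - 1 : ℕ) : ℤ) := by omega
  rw [e1, e2, PySem.List.pyGetD_natCast, PySem.List.pyGetD_natCast,
      PySem.List.pyGetD_natCast, PySem.List.pyGetD_natCast]
  rw [List.getD_eq_getElem _ _ (show k + 1 < (pvPrefix row).length by rw [pvPrefix_length]; omega),
      List.getD_eq_getElem _ _ (show k - 1 < (pvPrefix row).length by rw [pvPrefix_length]; omega),
      List.getD_eq_getElem _ _ hk2,
      List.getD_eq_getElem _ _ (show k - 1 < row.length by omega)]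
  simp only [pvPrefix_eq, List.getElem_map, List.getElem_range]
  have s1 := List.sum_take_succ row k hk2
  have s2 := List.sum_take_succ row (k - 1) (by omega)
  have e3 : k - 1 + 1 = k := by omega
  rw [e3] at s2
  omega

-- a row fetched at index 1 ≤ i < len lies in result.drop 1
theorem pv_mem_drop (result : List (List Int)) (i : Int) (hi1 : 1 ≤ i)
    (hi2 : i < (result.length : Int)) :
    PySem.List.pyGetD result i [] ∈ result.drop 1 := by
  rw [PySem.List.pyGetD_eq_getElem _ _ (by omega) hi2]
  have h1 : i.toNat - 1 < (result.drop 1).length := by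
    simp only [List.length_drop]; omega
  have e : result[i.toNat]'(by omega) = (result.drop 1)[i.toNat - 1]'h1 := by
    rw [List.getElem_drop]
    congr 1
    omega
  rw [e]
  exact List.getElem_mem _

theorem pv_main (result : List (List Int)) (hpre : Pre_find_start_point result) :
    find_start_point result = find_start_point_alt result := by
  by_cases hany : (result.drop 1).any (fun row => 1 < row.length) = true
  · -- some row i ≥ 1 has ≥ 2 cells: real comparisons happen
    obtain ⟨row, hrowmem, hrowlen⟩ := List.any_eq_true.mp hany
    obtain ⟨h0, h1, hadj⟩ :
        2 ≤ (result.getD 0 []).length ∧ 2 ≤ (result.getD 1 []).length ∧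
          ∀ pr ∈ result.zip (result.drop 1), 2 ≤ pr.2.length → pr.2.length ≤ pr.1.length := by
      rcases hpre with h | h
      · exact absurd (h row hrowmem) (by simpa using hrowlen)
      · exact h
    have hn2 : 2 ≤ result.length := by
      have hne : result.drop 1 ≠ [] := by
        intro h; rw [h] at hrowmem; simp at hrowmem
      have := List.length_pos_iff.mpr hne
      simp only [List.length_drop] at this
      omega
    have hpreGet : ∀ i : Int, 0 ≤ i → i < (result.length : Int) →
        PySem.List.pyGetD (result.map pvPrefix) i [] = pvPrefix (PySem.List.pyGetD result i []) := by
      intro i hi1 hi2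
      rw [PySem.List.pyGetD_eq_getElem (result.map pvPrefix) _ hi1 (by simpa using hi2),
          PySem.List.pyGetD_eq_getElem _ _ hi1 hi2]
      simp
    have hadj' : ∀ k : Nat, 1 ≤ k → (hk2 : k < result.length) →
        2 ≤ (result[k]'hk2).length →
        (result[k]'hk2).length ≤ (result[k - 1]'(by omega)).length := by
      intro k hk1 hk2 hlen
      have hzlen : k - 1 < (result.zip (result.drop 1)).length := by
        simp only [List.length_zip, List.length_drop]; omega
      have hdl : k - 1 < (result.drop 1).length := by
        simp only [List.length_drop]; omega
      have ed : (result.drop 1)[k - 1]'hdl = result[k]'hk2 := by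
        rw [List.getElem_drop]; congr 1; omega
      have hmemz : ((result[k - 1]'(by omega), result[k]'hk2)) ∈ result.zip (result.drop 1) := by
        have ez : (result.zip (result.drop 1))[k - 1]'hzlen
            = ((result[k - 1]'(by omega), (result.drop 1)[k - 1]'hdl)) := List.getElem_zip ..
        rw [ed] at ez
        rw [← ez]
        exact List.getElem_mem _
      exact hadj _ hmemz hlen
    have hblock : ∀ (i j : Int), 1 ≤ i → i < (result.length : Int) → 1 ≤ j →
        j < ((PySem.List.pyGetD result i []).length : Int) →
        PySem.List.pyGetD (PySem.List.pyGetD (result.map pvPrefix) i []) (j + 1) 0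
          - PySem.List.pyGetD (PySem.List.pyGetD (result.map pvPrefix) i []) (j - 1) 0
          + PySem.List.pyGetD (PySem.List.pyGetD (result.map pvPrefix) (i - 1) []) (j + 1) 0
          - PySem.List.pyGetD (PySem.List.pyGetD (result.map pvPrefix) (i - 1) []) (j - 1) 0
          = pvBlockA result i j := by
      intro i j hi1 hi2 hj1 hj2
      rw [hpreGet i (by omega) hi2, hpreGet (i - 1) (by omega) (by omega)]
      have hK : PySem.List.pyGetD result i [] = result[i.toNat]'(by omega) :=
        PySem.List.pyGetD_eq_getElem _ _ (by omega) hi2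
      have hK' : PySem.List.pyGetD result (i - 1) [] = result[(i - 1).toNat]'(by omega) :=
        PySem.List.pyGetD_eq_getElem _ _ (by omega) (by omega)
      have hup : (PySem.List.pyGetD result i []).length
          ≤ (PySem.List.pyGetD result (i - 1) []).length := by
        rw [hK, hK']
        have et : (i - 1).toNat = i.toNat - 1 := by omega
        simp only [et]
        exact hadj' i.toNat (by omega) (by omega) (by rw [← hK]; omega)
      have d1 := pvPrefix_diff (PySem.List.pyGetD result i []) j hj1 hj2
      have d2 := pvPrefix_diff (PySem.List.pyGetD result (i - 1) []) j hj1 (by omega)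
      unfold pvBlockA pvCell
      omega
    have hlen1 : 2 ≤ (PySem.List.pyGetD result 1 []).length := by
      have : (1 : Int) = ((1 : Nat) : Int) := by norm_num
      rw [this, PySem.List.pyGetD_natCast]
      omega
    -- the inner step preserves the relation once best is some (block of the incumbent)
    have hs_inner : ∀ (i : Int), 1 ≤ i → i < (result.length : Int) →
        ∀ (sa : Int × Int) (sb : Int × Int × Option Int) (j : Int),
        1 ≤ j → j < ((PySem.List.pyGetD result i []).length : Int) →
        sb.1 = sa.1 ∧ sb.2.1 = sa.2 ∧ sb.2.2 = some (pvBlockA result sa.1 sa.2) →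
        (pvStepB (PySem.List.pyGetD (result.map pvPrefix) i [])
            (PySem.List.pyGetD (result.map pvPrefix) (i - 1) []) i sb j).1
            = (pvStepA result i sa j).1 ∧
          (pvStepB (PySem.List.pyGetD (result.map pvPrefix) i [])
            (PySem.List.pyGetD (result.map pvPrefix) (i - 1) []) i sb j).2.1
            = (pvStepA result i sa j).2 ∧
          (pvStepB (PySem.List.pyGetD (result.map pvPrefix) i [])
            (PySem.List.pyGetD (result.map pvPrefix) (i - 1) []) i sb j).2.2
            = some (pvBlockA result (pvStepA result i sa j).1 (pvStepA result i sa j).2) := by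
      intro i hi1 hi2 sa sb j hj1 hj2 hR
      obtain ⟨e1, e2, e3⟩ := hR
      have hs := hblock i j hi1 hi2 hj1 hj2
      unfold pvStepA pvStepB
      simp only
      rw [hs, e3]
      rw [if_pos (show 0 < i ∧ 0 < j by omega)]
      by_cases hc : pvBlockA result sa.1 sa.2 < pvBlockA result i j
      · rw [if_pos hc, if_pos (by simp [pvGtOpt, hc])]
        exact ⟨rfl, rfl, rfl⟩
      · rw [if_neg hc, if_neg (by simp [pvGtOpt, hc])]
        exact ⟨e1, e2, e3⟩
    -- after the first valid position (1,1), A holds (1,1) and B holds (1,1, some block(1,1))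
    have hstep : ∀ (sa : Int × Int) (sb : Int × Int × Option Int) (i : Int),
        i ∈ PySem.List.pyRange 2 (result.length : Int) 1 →
        (sb.1 = sa.1 ∧ sb.2.1 = sa.2 ∧ sb.2.2 = some (pvBlockA result sa.1 sa.2)) →
        ((pvRowB result (result.map pvPrefix) sb i).1 = (pvRowA result sa i).1 ∧
         (pvRowB result (result.map pvPrefix) sb i).2.1 = (pvRowA result sa i).2 ∧
         (pvRowB result (result.map pvPrefix) sb i).2.2
           = some (pvBlockA result (pvRowA result sa i).1 (pvRowA result sa i).2)) := by
      intro sa sb i hi hR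
      have hi' := PySem.List.mem_pyRange_one.mp hi
      unfold pvRowA pvRowB
      by_cases hL1 : (PySem.List.pyGetD result i []).length ≤ 1
      · have hAfix : (PySem.List.pyRange 0 ((PySem.List.pyGetD result i []).length : Int) 1).foldl
            (pvStepA result i) sa = sa := by
          apply pv_foldl_fix
          intro s j hj
          have hj' := PySem.List.mem_pyRange_one.mp hj
          unfold pvStepA
          rw [if_neg (by omega)]
        rw [hAfix, PySem.List.pyRange_one_eq_nil (by omega)]
        exact hR
      · rw [PySem.List.pyRange_one_cons
              (show (0 : Int) < ((PySem.List.pyGetD result i []).length : Int) by omega),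
            List.foldl_cons]
        have e0 : pvStepA result i sa 0 = sa := by
          unfold pvStepA; rw [if_neg (by omega)]
        rw [e0]
        have e01 : (0 : Int) + 1 = 1 := by norm_num
        rw [e01]
        refine pv_foldl_rel
            (fun (sa : Int × Int) (sb : Int × Int × Option Int) =>
              sb.1 = sa.1 ∧ sb.2.1 = sa.2 ∧ sb.2.2 = some (pvBlockA result sa.1 sa.2))
            (pvStepA result i) (pvStepB _ _ i) _ sa sb hR ?_
        intro sa' sb' j hj hR'
        have hj' := PySem.List.mem_pyRange_one.mp hj
        exact hs_inner i (by omega) hi'.2 sa' sb' j hj'.1 hj'.2 hR'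
    simp only [find_start_point, find_start_point_alt]
    -- A's outer loop: peel i = 0 (no comparison) and i = 1
    rw [PySem.List.pyRange_one_cons (show (0 : Int) < (result.length : Int) by omega),
        List.foldl_cons]
    have hA0 : pvRowA result (1, 1) 0 = (1, 1) := by
      unfold pvRowA
      apply pv_foldl_fix
      intro s j hj
      unfold pvStepA
      rw [if_neg (by omega)]
    rw [hA0]
    have e01 : (0 : Int) + 1 = 1 := by norm_num
    rw [e01]
    rw [PySem.List.pyRange_one_cons (show (1 : Int) < (result.length : Int) by omega),
        List.foldl_cons]
    have e12 : (1 : Int) + 1 = 2 := by norm_num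
    rw [e12]
    -- in row 1, peel j = 0 (no comparison) and j = 1 (the first comparison) on both sides
    have hA1 : pvRowA result (1, 1) 1
        = (PySem.List.pyRange 2 ((PySem.List.pyGetD result 1 []).length : Int) 1).foldl
            (pvStepA result 1) (1, 1) := by
      unfold pvRowA
      rw [PySem.List.pyRange_one_cons
            (show (0 : Int) < ((PySem.List.pyGetD result 1 []).length : Int) by omega),
          List.foldl_cons]
      have e0 : pvStepA result 1 (1, 1) 0 = (1, 1) := by
        unfold pvStepA; rw [if_neg (by omega)]
      rw [e0, e01,
          PySem.List.pyRange_one_cons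
            (show (1 : Int) < ((PySem.List.pyGetD result 1 []).length : Int) by omega),
          List.foldl_cons]
      have e1 : pvStepA result 1 (1, 1) 1 = (1, 1) := by
        unfold pvStepA
        rw [if_pos (show (0 : Int) < 1 ∧ (0 : Int) < 1 by norm_num),
            if_neg (lt_irrefl _)]
      rw [e1, e12]
    have hB1 : pvRowB result (result.map pvPrefix) (1, 1, none) 1
        = (PySem.List.pyRange 2 ((PySem.List.pyGetD result 1 []).length : Int) 1).foldl
            (pvStepB (PySem.List.pyGetD (result.map pvPrefix) 1 [])
              (PySem.List.pyGetD (result.map pvPrefix) (1 - 1) []) 1)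
            (1, 1, some (pvBlockA result 1 1)) := by
      unfold pvRowB
      rw [PySem.List.pyRange_one_cons
            (show (1 : Int) < ((PySem.List.pyGetD result 1 []).length : Int) by omega),
          List.foldl_cons]
      have hs := hblock 1 1 (by norm_num) (by omega) (by norm_num)
        (by omega)
      have e1 : pvStepB (PySem.List.pyGetD (result.map pvPrefix) 1 [])
          (PySem.List.pyGetD (result.map pvPrefix) (1 - 1) []) 1 (1, 1, none) 1
          = (1, 1, some (pvBlockA result 1 1)) := by
        unfold pvStepB
        simp only [pvGtOpt, if_pos]
        norm_num at hs ⊢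
        rw [hs]
      rw [e1, e12]
    rw [hA1, List.foldl_cons, hB1]
    -- relate the rest of row 1, then the remaining rows
    have hrow1 := pv_foldl_rel
      (fun (sa : Int × Int) (sb : Int × Int × Option Int) =>
        sb.1 = sa.1 ∧ sb.2.1 = sa.2 ∧ sb.2.2 = some (pvBlockA result sa.1 sa.2))
      (pvStepA result 1)
      (pvStepB (PySem.List.pyGetD (result.map pvPrefix) 1 [])
        (PySem.List.pyGetD (result.map pvPrefix) (1 - 1) []) 1)
      (PySem.List.pyRange 2 ((PySem.List.pyGetD result 1 []).length : Int) 1)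
      (1, 1) (1, 1, some (pvBlockA result 1 1))
      ⟨rfl, rfl, rfl⟩
      (by
        intro sa sb j hj hR
        have hj' := PySem.List.mem_pyRange_one.mp hj
        exact hs_inner 1 (by norm_num) (by omega) sa sb j (by omega) hj'.2 hR)
    have hfinal := pv_foldl_rel
      (fun (sa : Int × Int) (sb : Int × Int × Option Int) =>
        sb.1 = sa.1 ∧ sb.2.1 = sa.2 ∧ sb.2.2 = some (pvBlockA result sa.1 sa.2))
      (pvRowA result) (pvRowB result (result.map pvPrefix))
      (PySem.List.pyRange 2 (result.length : Int) 1) _ _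
      hrow1
      (by
        intro sa sb i hi hR
        exact hstep sa sb i hi hR)
    obtain ⟨e1, e2, _⟩ := hfinal
    rw [e1, e2]
  · -- no row i ≥ 1 has ≥ 2 cells: no comparison ever fires, both return [32, 32]
    have hshort : ∀ row ∈ result.drop 1, row.length ≤ 1 := by
      intro row hrow
      by_contra hlen
      exact hany (List.any_eq_true.mpr ⟨row, hrow, by simpa using hlen⟩)
    have hA0 : ∀ (s : Int × Int) (i : Int), i ∈ PySem.List.pyRange 0 (result.length : Int) 1 →
        pvRowA result s i = s := by
      intro s i hi
      have hi' := PySem.List.mem_pyRange_one.mp hi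
      unfold pvRowA
      apply pv_foldl_fix
      intro s' j hj
      have hj' := PySem.List.mem_pyRange_one.mp hj
      unfold pvStepA
      rcases eq_or_lt_of_le hi'.1 with h0 | h0
      · rw [if_neg (by omega)]
      · have hrow := hshort _ (pv_mem_drop result i (by omega) hi'.2)
        rw [if_neg (by omega)]
    have hB0 : ∀ (s : Int × Int × Option Int) (i : Int),
        i ∈ PySem.List.pyRange 1 (result.length : Int) 1 →
        pvRowB result (result.map pvPrefix) s i = s := by
      intro s i hi
      have hi' := PySem.List.mem_pyRange_one.mp hi
      have hrow := hshort _ (pv_mem_drop result i hi'.1 hi'.2)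
      unfold pvRowB
      rw [PySem.List.pyRange_one_eq_nil (by omega)]
      rfl
    simp only [find_start_point, find_start_point_alt]
    rw [pv_foldl_fix _ _ hA0, pv_foldl_fix _ _ hB0]

-- ===== VERDICT (by name: the statement is the Claim_ definition above) =====
theorem find_start_point_spec : Claim_equal_find_start_point := by
  intro result _ hpre
  unfold Spec_find_start_point
  exact pv_main result hpre
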